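-- pv_equiv track=rewrite | github.com/PNTLinh/AI-Academic-Advisor | data/processing_regulation.py | _infer_department
-- ===== SOURCE A (Python) =====
-- def _infer_department(course_id: str) -> str:
--     dept_map = {
--         "IT": "Vien Cong nghe Thong tin va Truyen thong",
--         "ET": "Vien Dien tu - Vien thong",
--         "MI": "Vien Toan ung dung va Tin hoc",
--         "PH": "Vien Vat ly Ky thuat",
--         "CH": "Vien Ky thuat Hoa hoc",
--         "FL": "Vien Ngoai ngu",
--         "EM": "Vien Kinh te va Quan ly",
--         "ED": "Trung tam Giao duc The chat",
--         "SSH": "Vien Su pham Ky thuat",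
--     }
--     for prefix, dept in dept_map.items():
--         if course_id.startswith(prefix):
--             return dept
--     return ""
-- ===== SOURCE B (Python) =====
-- def _infer_department(course_id: str) -> str:
--     # Hard-coded decision tree on the leading characters; no prefix table, no scan.
--     c0, c1 = course_id[:1], course_id[1:2]
--     if c0 == "I":
--         return "Vien Cong nghe Thong tin va Truyen thong" if c1 == "T" else ""
--     if c0 == "E":
--         if c1 == "T":
--             return "Vien Dien tu - Vien thong"
--         if c1 == "M":
--             return "Vien Kinh te va Quan ly"
--         if c1 == "D":
--             return "Trung tam Giao duc The chat"
--         return ""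
--     if c0 == "M":
--         return "Vien Toan ung dung va Tin hoc" if c1 == "I" else ""
--     if c0 == "P":
--         return "Vien Vat ly Ky thuat" if c1 == "H" else ""
--     if c0 == "C":
--         return "Vien Ky thuat Hoa hoc" if c1 == "H" else ""
--     if c0 == "F":
--         return "Vien Ngoai ngu" if c1 == "L" else ""
--     if c0 == "S":
--         return "Vien Su pham Ky thuat" if c1 == "S" and course_id[2:3] == "H" else ""
--     return ""
-- ===== Notes on version B (the rewrite author's own statement) =====
-- stated objective: alternative
-- what changed: Replaced the loop over a prefix->department dict with startswith tests by a hard-coded decision tree that dispatches on the first character and then checks the second (and, for 'SS', third) character directly; the table disappears into control flow.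
import Mathlib
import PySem

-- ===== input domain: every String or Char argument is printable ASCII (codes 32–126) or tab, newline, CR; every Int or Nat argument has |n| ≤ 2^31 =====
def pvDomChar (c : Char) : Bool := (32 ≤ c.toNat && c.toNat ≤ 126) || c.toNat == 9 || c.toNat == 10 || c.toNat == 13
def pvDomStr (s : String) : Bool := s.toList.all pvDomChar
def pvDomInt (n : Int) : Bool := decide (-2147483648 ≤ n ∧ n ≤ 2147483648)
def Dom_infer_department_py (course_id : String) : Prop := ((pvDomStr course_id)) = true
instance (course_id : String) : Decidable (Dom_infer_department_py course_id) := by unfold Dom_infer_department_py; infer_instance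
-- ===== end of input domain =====

-- B replaces A's loop over a prefix->department table (startswith per entry) by a hard-coded
-- decision tree on the leading characters (objective: alternative; the table disappears into control flow).

-- ===== PORT A =====
-- A's dict literal, in insertion order
def pvDeptMap : PySem.Dict String String := PySem.Dict.ofList
  [("IT", "Vien Cong nghe Thong tin va Truyen thong"),
   ("ET", "Vien Dien tu - Vien thong"),
   ("MI", "Vien Toan ung dung va Tin hoc"),
   ("PH", "Vien Vat ly Ky thuat"),
   ("CH", "Vien Ky thuat Hoa hoc"),
   ("FL", "Vien Ngoai ngu"),
   ("EM", "Vien Kinh te va Quan ly"),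
   ("ED", "Trung tam Giao duc The chat"),
   ("SSH", "Vien Su pham Ky thuat")]

-- A's loop: 'for prefix, dept in dept_map.items(): if course_id.startswith(prefix): return dept'
def pvScanDept (course_id : String) : List (String × String) → String
  | [] => ""
  | (pre, dept) :: rest =>
      if PySem.Str.startswith course_id pre then dept else pvScanDept course_id rest

def infer_department_py (course_id : String) : String :=
  pvScanDept course_id pvDeptMap.items

-- ===== PORT B =====
-- Source B's decision tree: c0 = course_id[:1], c1 = course_id[1:2], nested char comparisons
def infer_department_py_alt (course_id : String) : String :=
  let c0 := PySem.Str.slice course_id none (some 1)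
  let c1 := PySem.Str.slice course_id (some 1) (some 2)
  if c0 = "I" then (if c1 = "T" then "Vien Cong nghe Thong tin va Truyen thong" else "")
  else if c0 = "E" then
    (if c1 = "T" then "Vien Dien tu - Vien thong"
     else if c1 = "M" then "Vien Kinh te va Quan ly"
     else if c1 = "D" then "Trung tam Giao duc The chat"
     else "")
  else if c0 = "M" then (if c1 = "I" then "Vien Toan ung dung va Tin hoc" else "")
  else if c0 = "P" then (if c1 = "H" then "Vien Vat ly Ky thuat" else "")
  else if c0 = "C" then (if c1 = "H" then "Vien Ky thuat Hoa hoc" else "")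
  else if c0 = "F" then (if c1 = "L" then "Vien Ngoai ngu" else "")
  else if c0 = "S" then
    (if c1 = "S" ∧ PySem.Str.slice course_id (some 2) (some 3) = "H"
     then "Vien Su pham Ky thuat" else "")
  else ""


-- ===== PRECONDITION & SPEC =====
def Spec_infer_department_py (course_id : String) (out : String) : Prop := out = infer_department_py_alt course_id
instance (course_id : String) (out : String) : Decidable (Spec_infer_department_py course_id out) := by unfold Spec_infer_department_py; infer_instance

-- ===== CLAIM (what is proved, stated in full; the proofs are below) =====
def Claim_equal_infer_department_py : Prop := ∀ (course_id : String), Dom_infer_department_py course_id → Spec_infer_department_py course_id (infer_department_py course_id)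

-- ===== LEMMAS AND PROOFS =====

theorem pv_slice01 (cs : List Char) :
    PySem.Str.slice (String.ofList cs) none (some 1) = String.ofList (cs.take 1) := by
  rw [← String.toList_inj]
  simp only [PySem.Str.toList_slice, PySem.Chars.slice_eq_listSlice, String.toList_ofList]
  rw [PySem.List.slice_to (b := 1) _ (by decide)]; rfl

theorem pv_slice12 (cs : List Char) :
    PySem.Str.slice (String.ofList cs) (some 1) (some 2) = String.ofList ((cs.drop 1).take 1) := by
  rw [← String.toList_inj]
  simp only [PySem.Str.toList_slice, PySem.Chars.slice_eq_listSlice, String.toList_ofList]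
  rw [PySem.List.slice_toNat (a := 1) (b := 2) _ (by decide) (by decide)]; rfl

theorem pv_slice23 (cs : List Char) :
    PySem.Str.slice (String.ofList cs) (some 2) (some 3) = String.ofList ((cs.drop 2).take 1) := by
  rw [← String.toList_inj]
  simp only [PySem.Str.toList_slice, PySem.Chars.slice_eq_listSlice, String.toList_ofList]
  rw [PySem.List.slice_toNat (a := 2) (b := 3) _ (by decide) (by decide)]; rfl

theorem pv_main (cs : List Char) :
    infer_department_py (String.ofList cs) = infer_department_py_alt (String.ofList cs) := by
  unfold infer_department_py infer_department_py_alt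
  rw [pv_slice01, pv_slice12, pv_slice23,
     show pvDeptMap.items = [("IT", "Vien Cong nghe Thong tin va Truyen thong"),
   ("ET", "Vien Dien tu - Vien thong"),
   ("MI", "Vien Toan ung dung va Tin hoc"),
   ("PH", "Vien Vat ly Ky thuat"),
   ("CH", "Vien Ky thuat Hoa hoc"),
   ("FL", "Vien Ngoai ngu"),
   ("EM", "Vien Kinh te va Quan ly"),
   ("ED", "Trung tam Giao duc The chat"),
   ("SSH", "Vien Su pham Ky thuat")] from rfl]
  rcases cs with _ | ⟨a, _ | ⟨b, _ | ⟨c, rest⟩⟩⟩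
  · decide
  · -- one char: every branch of both sides is ""
    simp only [List.take, List.drop, pvScanDept, PySem.Str.startswith_eq, String.toList_ofList,
      show ("IT":String).toList = ['I','T'] from rfl,
      show ("ET":String).toList = ['E','T'] from rfl,
      show ("MI":String).toList = ['M','I'] from rfl,
      show ("PH":String).toList = ['P','H'] from rfl,
      show ("CH":String).toList = ['C','H'] from rfl,
      show ("FL":String).toList = ['F','L'] from rfl,
      show ("EM":String).toList = ['E','M'] from rfl,
      show ("ED":String).toList = ['E','D'] from rfl,
      show ("SSH":String).toList = ['S','S','H'] from rfl,
      PySem.Chars.startswith, List.isPrefixOf, Bool.and_eq_true, beq_iff_eq,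
      ← String.toList_inj, String.toList_ofList,
      show ("I":String).toList = ['I'] from rfl,
      show ("E":String).toList = ['E'] from rfl,
      show ("M":String).toList = ['M'] from rfl,
      show ("P":String).toList = ['P'] from rfl,
      show ("C":String).toList = ['C'] from rfl,
      show ("F":String).toList = ['F'] from rfl,
      show ("S":String).toList = ['S'] from rfl,
      show ("T":String).toList = ['T'] from rfl,
      show ("D":String).toList = ['D'] from rfl,
      show ("H":String).toList = ['H'] from rfl,
      show ("L":String).toList = ['L'] from rfl,
      List.cons_eq_cons, Bool.false_eq_true, and_false, and_true, false_and, true_and,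
      reduceCtorEq, if_false, if_true]
    split_ifs <;> rfl
  · -- two chars
    simp only [List.take, List.drop, pvScanDept, PySem.Str.startswith_eq, String.toList_ofList,
      show ("IT":String).toList = ['I','T'] from rfl,
      show ("ET":String).toList = ['E','T'] from rfl,
      show ("MI":String).toList = ['M','I'] from rfl,
      show ("PH":String).toList = ['P','H'] from rfl,
      show ("CH":String).toList = ['C','H'] from rfl,
      show ("FL":String).toList = ['F','L'] from rfl,
      show ("EM":String).toList = ['E','M'] from rfl,
      show ("ED":String).toList = ['E','D'] from rfl,
      show ("SSH":String).toList = ['S','S','H'] from rfl,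
      PySem.Chars.startswith, List.isPrefixOf, Bool.and_eq_true, beq_iff_eq,
      ← String.toList_inj, String.toList_ofList,
      show ("I":String).toList = ['I'] from rfl,
      show ("E":String).toList = ['E'] from rfl,
      show ("M":String).toList = ['M'] from rfl,
      show ("P":String).toList = ['P'] from rfl,
      show ("C":String).toList = ['C'] from rfl,
      show ("F":String).toList = ['F'] from rfl,
      show ("S":String).toList = ['S'] from rfl,
      show ("T":String).toList = ['T'] from rfl,
      show ("D":String).toList = ['D'] from rfl,
      show ("H":String).toList = ['H'] from rfl,
      show ("L":String).toList = ['L'] from rfl,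
      List.cons_eq_cons, Bool.false_eq_true, and_false, and_true, false_and, true_and,
      reduceCtorEq, if_false, if_true]
    by_cases hI : a = 'I'
    · subst hI; by_cases hT : b = 'T' <;> simp_all [eq_comm]
    by_cases hE : a = 'E'
    · subst hE
      by_cases h1 : b = 'T'; · simp_all [eq_comm]
      by_cases h2 : b = 'M'; · simp_all [eq_comm]
      by_cases h3 : b = 'D' <;> simp_all [eq_comm]
    by_cases hM : a = 'M'
    · subst hM; by_cases h : b = 'I' <;> simp_all [eq_comm]
    by_cases hP : a = 'P'
    · subst hP; by_cases h : b = 'H' <;> simp_all [eq_comm]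
    by_cases hC : a = 'C'
    · subst hC; by_cases h : b = 'H' <;> simp_all [eq_comm]
    by_cases hF : a = 'F'
    · subst hF; by_cases h : b = 'L' <;> simp_all [eq_comm]
    by_cases hS : a = 'S'
    · subst hS; by_cases h : b = 'S' <;> simp_all [eq_comm]
    simp_all [eq_comm]
  · -- three or more chars
    simp only [List.take, List.drop, pvScanDept, PySem.Str.startswith_eq, String.toList_ofList,
      show ("IT":String).toList = ['I','T'] from rfl,
      show ("ET":String).toList = ['E','T'] from rfl,
      show ("MI":String).toList = ['M','I'] from rfl,
      show ("PH":String).toList = ['P','H'] from rfl,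
      show ("CH":String).toList = ['C','H'] from rfl,
      show ("FL":String).toList = ['F','L'] from rfl,
      show ("EM":String).toList = ['E','M'] from rfl,
      show ("ED":String).toList = ['E','D'] from rfl,
      show ("SSH":String).toList = ['S','S','H'] from rfl,
      PySem.Chars.startswith, List.isPrefixOf, Bool.and_eq_true, beq_iff_eq,
      ← String.toList_inj, String.toList_ofList,
      show ("I":String).toList = ['I'] from rfl,
      show ("E":String).toList = ['E'] from rfl,
      show ("M":String).toList = ['M'] from rfl,
      show ("P":String).toList = ['P'] from rfl,
      show ("C":String).toList = ['C'] from rfl,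
      show ("F":String).toList = ['F'] from rfl,
      show ("S":String).toList = ['S'] from rfl,
      show ("T":String).toList = ['T'] from rfl,
      show ("D":String).toList = ['D'] from rfl,
      show ("H":String).toList = ['H'] from rfl,
      show ("L":String).toList = ['L'] from rfl,
      List.cons_eq_cons, Bool.false_eq_true, and_false, and_true, false_and, true_and,
      reduceCtorEq, if_false, if_true]
    by_cases hI : a = 'I'
    · subst hI; by_cases hT : b = 'T' <;> simp_all [eq_comm]
    by_cases hE : a = 'E'
    · subst hE
      by_cases h1 : b = 'T'; · simp_all [eq_comm]
      by_cases h2 : b = 'M'; · simp_all [eq_comm]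
      by_cases h3 : b = 'D' <;> simp_all [eq_comm]
    by_cases hM : a = 'M'
    · subst hM; by_cases h : b = 'I' <;> simp_all [eq_comm]
    by_cases hP : a = 'P'
    · subst hP; by_cases h : b = 'H' <;> simp_all [eq_comm]
    by_cases hC : a = 'C'
    · subst hC; by_cases h : b = 'H' <;> simp_all [eq_comm]
    by_cases hF : a = 'F'
    · subst hF; by_cases h : b = 'L' <;> simp_all [eq_comm]
    by_cases hS : a = 'S'
    · subst hS
      by_cases h1 : b = 'S'
      · by_cases h2 : c = 'H' <;> simp_all [eq_comm]
      · simp_all [eq_comm]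
    simp_all [eq_comm]

-- ===== VERDICT (by name: the statement is the Claim_ definition above) =====
theorem infer_department_py_spec : Claim_equal_infer_department_py := by
  intro s _
  unfold Spec_infer_department_py
  simpa using pv_main s.toList
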